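-- pv_equiv track=rewrite | github.com/Hulyamr13/hackerrank | problem37.py | can_stack_cubes
-- ===== SOURCE A (Python) =====
-- from collections import deque
--
-- def can_stack_cubes(n, cubes):
--     # create a deque to represent the vertical pile of cubes
--     pile = deque()
--
--     # maintain two pointers at the beginning and end of the array of cube lengths
--     left = 0
--     right = n - 1
--
--     # stack the cubes according to the given rule
--     while left <= right:
--         # compare the lengths of the cubes at the current positions of the two pointers
--         if cubes[left] >= cubes[right]:
--             pile.appendleft(cubes[left])
--             left += 1
--         else:
--             pile.appendleft(cubes[right])
--             right -= 1
--
--         # check if the last cube in the pile violates the given rule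
--         if len(pile) > 1 and abs(pile[0] - pile[1]) > 1:
--             return "No"
--
--     # all cubes have been stacked successfully
--     return "Yes"
-- ===== SOURCE B (Python) =====
-- from collections import deque
--
-- def can_stack_cubes(n, cubes):
--     # Consume the row of cubes destructively from both ends, remembering only
--     # the last cube placed; no index arithmetic and no pile is kept.
--     row = deque(cubes[i] for i in range(n))
--     prev = None
--     while row:
--         cube = row.popleft() if row[0] >= row[-1] else row.pop()
--         if prev is not None and abs(prev - cube) > 1:
--             return "No"
--         prev = cube
--     return "Yes"
-- ===== Notes on version B (the rewrite author's own statement) =====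
-- stated objective: alternative
-- what changed: A keeps two index pointers into cubes plus a growing pile deque and checks the pile's top two entries after every placement; B materializes the first n cubes once, destructively consumes that row from both ends (popleft/pop on a deque), and keeps only the previously placed cube as O(1) state - no index arithmetic and no pile is ever built.
import Mathlib
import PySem

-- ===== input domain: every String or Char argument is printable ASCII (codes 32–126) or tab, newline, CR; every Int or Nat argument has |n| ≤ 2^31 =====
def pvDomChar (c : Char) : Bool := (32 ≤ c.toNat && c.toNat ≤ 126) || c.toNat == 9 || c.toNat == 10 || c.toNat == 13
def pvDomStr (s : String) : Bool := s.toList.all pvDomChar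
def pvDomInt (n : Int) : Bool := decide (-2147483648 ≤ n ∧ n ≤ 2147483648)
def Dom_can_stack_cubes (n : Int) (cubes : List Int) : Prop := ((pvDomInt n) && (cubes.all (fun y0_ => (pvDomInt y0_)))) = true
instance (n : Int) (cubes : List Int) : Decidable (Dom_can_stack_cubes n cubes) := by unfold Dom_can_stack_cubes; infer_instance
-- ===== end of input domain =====

-- B replaces A's two index pointers + growing pile deque (checking the pile's top
-- two after each placement) by destructive both-ends consumption of the first-n row
-- with only the previously placed cube as state; objective: alternative, same cost.


-- ===== PORT A =====
-- A's while loop with two pointers and the deque `pile` (appendleft = cons at the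
-- front).  The `none` branches of pyGet? correspond to a Python IndexError (outside
-- Pre_); the port returns "" there (never reached inside Pre_).
def canStackA_loop (cubes : List Int) (left right : Int) (pile : List Int) : String :=
  if _h : left ≤ right then
    match PySem.List.pyGet? cubes left, PySem.List.pyGet? cubes right with
    | some cl, some cr =>
      if cl ≥ cr then
        let pile' := cl :: pile
        match pile' with
        | v :: p :: _ => if |v - p| > 1 then "No" else canStackA_loop cubes (left + 1) right pile'
        | _ => canStackA_loop cubes (left + 1) right pile'
      else
        let pile' := cr :: pile
        match pile' with
        | v :: p :: _ => if |v - p| > 1 then "No" else canStackA_loop cubes left (right - 1) pile'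
        | _ => canStackA_loop cubes left (right - 1) pile'
    | _, _ => ""   -- IndexError in Python
  else "Yes"
termination_by (right - left + 1).toNat
decreasing_by all_goals omega

def can_stack_cubes (n : Int) (cubes : List Int) : String :=
  canStackA_loop cubes 0 (n - 1) []

-- ===== PORT B =====
-- Source B builds `row = deque(cubes[i] for i in range(n))`; pyGet? = cubes[i], and a
-- `none` (IndexError) makes the whole build none.
def canStackB_init (n : Int) (cubes : List Int) : Option (List Int) :=
  (PySem.List.pyRange 0 n 1).mapM (fun i => PySem.List.pyGet? cubes i)

-- Source B's while loop: `while row:` pops from the left (head) or the right (dropLast),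
-- comparing row[0] (the head) with row[-1] (pyGetD row (-1); row is nonempty here,
-- so the default 0 is never used), keeping only `prev`.
def canStackB_loop : List Int → Option Int → String
  | [], _ => "Yes"
  | x :: rest, prev =>
    let lastv := PySem.List.pyGetD (x :: rest) (-1) 0   -- row[-1]
    if x ≥ lastv then
      match prev with
      | some p => if |p - x| > 1 then "No" else canStackB_loop rest (some x)
      | none => canStackB_loop rest (some x)
    else
      match prev with
      | some p => if |p - lastv| > 1 then "No" else canStackB_loop ((x :: rest).dropLast) (some lastv)
      | none => canStackB_loop ((x :: rest).dropLast) (some lastv)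
termination_by xs _ => xs.length
decreasing_by all_goals simp [List.length_dropLast]

def can_stack_cubes_alt (n : Int) (cubes : List Int) : String :=
  match canStackB_init n cubes with
  | some row => canStackB_loop row none
  | none => ""   -- IndexError in Python

-- ===== PRECONDITION & SPEC =====
-- Pre_ excludes exactly the inputs where Python A raises IndexError (n larger than
-- len(cubes), so the loop reads past the end); B raises there too.
def Pre_can_stack_cubes (n : Int) (cubes : List Int) : Prop := n ≤ (cubes.length : Int)
instance (n : Int) (cubes : List Int) : Decidable (Pre_can_stack_cubes n cubes) := by unfold Pre_can_stack_cubes; infer_instance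
def pvWitness_can_stack_cubes : Int × List Int := (4, [4, 3, 2, 3])

def Spec_can_stack_cubes (n : Int) (cubes : List Int) (out : String) : Prop := out = can_stack_cubes_alt n cubes
instance (n : Int) (cubes : List Int) (out : String) : Decidable (Spec_can_stack_cubes n cubes out) := by unfold Spec_can_stack_cubes; infer_instance

-- ===== CLAIM (what is proved, stated in full; the proofs are below) =====
def Claim_equal_can_stack_cubes : Prop := ∀ (n : Int) (cubes : List Int), Dom_can_stack_cubes n cubes → Pre_can_stack_cubes n cubes → Spec_can_stack_cubes n cubes (can_stack_cubes n cubes)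

-- ===== LEMMAS AND PROOFS =====

-- the window of cubes still unconsumed when the pointers stand at l and r
def window (cubes : List Int) (l r : Int) : List Int :=
  (cubes.drop l.toNat).take (r - l + 1).toNat

theorem window_nil (cubes : List Int) (l r : Int) (h : r < l) :
    window cubes l r = [] := by
  unfold window
  have : (r - l + 1).toNat = 0 := by omega
  simp [this]

theorem window_cons (cubes : List Int) (l r : Int) (hl : 0 ≤ l) (hlr : l ≤ r)
    (hr : r < (cubes.length : Int)) :
    window cubes l r = cubes[l.toNat]! :: window cubes (l + 1) r := by
  unfold window
  have hlen : l.toNat < cubes.length := by omega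
  have hd : cubes.drop l.toNat = cubes[l.toNat] :: cubes.drop (l.toNat + 1) :=
    List.drop_eq_getElem_cons hlen
  have hk : (r - l + 1).toNat = (r - (l + 1) + 1).toNat + 1 := by omega
  rw [hd, hk, List.take_succ_cons]
  have : (l + 1).toNat = l.toNat + 1 := by omega
  rw [this, getElem!_pos cubes l.toNat hlen]

theorem window_snoc (cubes : List Int) (l r : Int) (hl : 0 ≤ l) (hlr : l ≤ r)
    (hr : r < (cubes.length : Int)) :
    window cubes l r = window cubes l (r - 1) ++ [cubes[r.toNat]!] := by
  unfold window
  have hk : (r - l + 1).toNat = (r - l).toNat + 1 := by omega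
  have hk2 : (r - 1 - l + 1).toNat = (r - l).toNat := by omega
  rw [hk, hk2, List.take_add_one]
  have hi : (cubes.drop l.toNat)[(r - l).toNat]? = some cubes[r.toNat]! := by
    have h1 : r.toNat < cubes.length := by omega
    have h2 : l.toNat + (r - l).toNat < cubes.length := by omega
    rw [List.getElem?_drop]
    have hidx : l.toNat + (r - l).toNat = r.toNat := by omega
    rw [hidx, List.getElem?_eq_getElem h1, getElem!_pos cubes r.toNat h1]
  rw [hi]
  rfl

theorem window_getLast (cubes : List Int) (l r : Int) (hl : 0 ≤ l) (hlr : l ≤ r)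
    (hr : r < (cubes.length : Int)) :
    PySem.List.pyGetD (window cubes l r) (-1) 0 = cubes[r.toNat]! := by
  rw [window_snoc cubes l r hl hlr hr, PySem.List.pyGetD_neg_one_append_singleton]

theorem window_dropLast (cubes : List Int) (l r : Int) (hl : 0 ≤ l) (hlr : l ≤ r)
    (hr : r < (cubes.length : Int)) :
    (window cubes l r).dropLast = window cubes l (r - 1) := by
  rw [window_snoc cubes l r hl hlr hr, List.dropLast_concat]

theorem canStackB_loop_cons (x : Int) (rest : List Int) (prev : Option Int) :
    canStackB_loop (x :: rest) prev =
      (let lastv := PySem.List.pyGetD (x :: rest) (-1) 0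
       if x ≥ lastv then
         match prev with
         | some p => if |p - x| > 1 then "No" else canStackB_loop rest (some x)
         | none => canStackB_loop rest (some x)
       else
         match prev with
         | some p => if |p - lastv| > 1 then "No" else canStackB_loop ((x :: rest).dropLast) (some lastv)
         | none => canStackB_loop ((x :: rest).dropLast) (some lastv)) := by
  rw [canStackB_loop.eq_def]

-- main invariant: A's pointer loop equals B's destructive loop on the unconsumed
-- window, with prev = the top of A's pile
theorem loop_eq (cubes : List Int) (l r : Int) (pile : List Int)
    (hl : 0 ≤ l) (hr : r < (cubes.length : Int)) :
    canStackA_loop cubes l r pile = canStackB_loop (window cubes l r) pile.head? := by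
  by_cases h : l ≤ r
  · have hls : PySem.List.pyGet? cubes l = some cubes[l.toNat]! := by
      rw [PySem.List.pyGet?_of_nonneg cubes hl]
      have h1 : l.toNat < cubes.length := by omega
      simp [h1]
    have hrge : (0:Int) ≤ r := le_trans hl h
    have hrs : PySem.List.pyGet? cubes r = some cubes[r.toNat]! := by
      rw [PySem.List.pyGet?_of_nonneg cubes hrge]
      have h1 : r.toNat < cubes.length := by omega
      simp [h1]
    have hwin := window_cons cubes l r hl h hr
    have hlast0 := window_getLast cubes l r hl h hr
    have hdrop0 := window_dropLast cubes l r hl h hr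
    rw [hwin] at hlast0 hdrop0
    rw [canStackA_loop, hwin, canStackB_loop_cons]
    simp only [h, dif_pos, hls, hrs, hlast0]
    split_ifs with hc
    · -- chose cubes[left] = the head of the window
      cases pile with
      | nil =>
        simp only [List.head?]
        rw [loop_eq cubes (l + 1) r [cubes[l.toNat]!] (by omega) hr]
        rfl
      | cons p rest =>
        simp only [List.head?]
        rw [abs_sub_comm p]
        split_ifs with hv
        · rfl
        · rw [loop_eq cubes (l + 1) r (cubes[l.toNat]! :: p :: rest) (by omega) hr]
          rfl
    · -- chose cubes[right] = the last of the window
      cases pile with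
      | nil =>
        simp only [List.head?]
        rw [loop_eq cubes l (r - 1) [cubes[r.toNat]!] hl (by omega), ← hdrop0]
        rfl
      | cons p rest =>
        simp only [List.head?]
        rw [abs_sub_comm p]
        split_ifs with hv
        · rfl
        · rw [loop_eq cubes l (r - 1) (cubes[r.toNat]! :: p :: rest) hl (by omega), ← hdrop0]
          rfl
  · rw [canStackA_loop, window_nil cubes l r (by omega)]
    simp [h, canStackB_loop]
termination_by (r - l + 1).toNat
decreasing_by all_goals omega

-- the built row is exactly the window 0 .. n-1 when n ≤ len(cubes)
theorem init_eq_window (cubes : List Int) (a n : Int) (ha : 0 ≤ a)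
    (hn : n ≤ (cubes.length : Int)) :
    (PySem.List.pyRange a n 1).mapM (fun i => PySem.List.pyGet? cubes i)
      = some ((cubes.drop a.toNat).take (n - a).toNat) := by
  by_cases h : a < n
  · rw [PySem.List.pyRange_one_cons h, List.mapM_cons]
    have h1 : a.toNat < cubes.length := by omega
    have hga : PySem.List.pyGet? cubes a = some cubes[a.toNat]! := by
      rw [PySem.List.pyGet?_of_nonneg cubes ha]
      simp [h1]
    rw [hga, init_eq_window cubes (a + 1) n (by omega) hn]
    have hd : cubes.drop a.toNat = cubes[a.toNat] :: cubes.drop (a.toNat + 1) :=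
      List.drop_eq_getElem_cons h1
    have hk : (n - a).toNat = (n - (a + 1)).toNat + 1 := by omega
    have ht : (a + 1).toNat = a.toNat + 1 := by omega
    rw [hd, hk, List.take_succ_cons, ht, getElem!_pos cubes a.toNat h1]
    rfl
  · rw [PySem.List.pyRange_one_eq_nil (by omega)]
    have : (n - a).toNat = 0 := by omega
    simp [this, List.mapM_nil]
termination_by (n - a).toNat
decreasing_by omega

-- ===== VERDICT (by name: the statement is the Claim_ definition above) =====
theorem can_stack_cubes_spec : Claim_equal_can_stack_cubes := by
  intro n cubes _hd hp
  unfold Spec_can_stack_cubes can_stack_cubes can_stack_cubes_alt canStackB_init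
  have hn : n ≤ (cubes.length : Int) := hp
  rw [init_eq_window cubes 0 n le_rfl hn]
  have hw : (cubes.drop (0:Int).toNat).take (n - 0).toNat = window cubes 0 (n - 1) := by
    unfold window
    congr 1
    omega
  rw [hw]
  have hr : n - 1 < (cubes.length : Int) := by omega
  simpa using loop_eq cubes 0 (n - 1) [] le_rfl hr
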